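-- pv_equiv track=rewrite | github.com/SebasTankUTN/SP_Agrupados | src/data/processor.py | comprobar_grupo
-- ===== SOURCE A (Python) =====
-- def comprobar_elementos_en_lista(lista:list, elemento:any):
--     """Comprueba si el elemento se encuentra en la lista
--
--     Args:
--         lista (list): vector a recorrer
--         elemento (any): valor a encontrar
--
--     Returns:
--         _bool_: devuelve True si lo encontro.
--                 devuelve False no lo encontro.
--     """
--     bandera = False
--     if elemento in lista:
--
--         bandera = True
--
--     return bandera
--
-- def comprobar_grupo(elecciones:list, lista_jugados:list) -> bool:
--     """Comprueba si Los elementos elegidos por el usuario coinciden con algun grupo original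
--     previamente establecido.
--
--     Args:
--         elecciones (list): Lista con los elemento que ingreso el usuario.
--         lista_jugados (list): lista que contiene todos los elementos de cada grupo de forma correcta.
--
--     Returns:
--         bool: Si es true, Todos los elementos coinciden con el mismo grupo.
--             Si es false, Todos los elementos no coinciden con el mismo grupo.
--     """
--     bandera = False
--
--     for grupo in lista_jugados:
--
--         for i in range(len(elecciones)):
--             if comprobar_elementos_en_lista( grupo["elementos"], elecciones[i] ):
--                 if i == 3:
--                     bandera = True
--                     break
--             else:
--                 break
--     return bandera
-- ===== SOURCE B (Python) =====
-- def comprobar_grupo(elecciones: list, lista_jugados: list) -> bool: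
--     """Index-then-intersect: map each element to the set of group indices
--     containing it, then check the first four choices share a group."""
--     if len(elecciones) < 4:
--         return False
--     idx = {}
--     for g, grupo in enumerate(lista_jugados):
--         for e in grupo["elementos"]:
--             idx.setdefault(e, set()).add(g)
--     common = idx.get(elecciones[0], set())
--     for k in range(1, 4):
--         common = common & idx.get(elecciones[k], set())
--     return len(common) > 0
-- ===== Notes on version B (the rewrite author's own statement) =====
-- stated objective: alternative
-- what changed: Replaces A's flag-and-break nested scan (per group, per choice index, linear membership scan) by one indexing pass building element -> set of group indices, then intersecting the four choices' index sets.
import Mathlib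
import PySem

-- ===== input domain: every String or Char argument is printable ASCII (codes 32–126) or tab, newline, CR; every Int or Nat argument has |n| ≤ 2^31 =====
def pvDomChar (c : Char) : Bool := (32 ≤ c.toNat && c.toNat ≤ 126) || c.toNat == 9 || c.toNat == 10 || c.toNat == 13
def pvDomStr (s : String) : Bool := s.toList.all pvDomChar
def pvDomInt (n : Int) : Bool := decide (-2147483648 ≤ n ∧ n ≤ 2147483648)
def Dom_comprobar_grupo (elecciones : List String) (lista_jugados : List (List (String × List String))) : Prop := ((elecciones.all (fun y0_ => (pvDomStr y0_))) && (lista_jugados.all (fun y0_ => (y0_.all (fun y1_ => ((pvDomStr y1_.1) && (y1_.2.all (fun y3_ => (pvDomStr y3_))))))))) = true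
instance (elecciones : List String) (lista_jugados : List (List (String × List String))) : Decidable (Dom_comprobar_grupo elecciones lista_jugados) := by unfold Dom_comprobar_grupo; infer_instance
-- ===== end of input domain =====

-- B replaces A's flag-and-break nested membership scan by an inverted index (element -> set of
-- group indices) built in one pass, then intersects the four chosen elements' index sets.

-- ===== PORT A =====
def comprobar_elementos_en_lista (lista : List String) (elemento : String) : Bool :=
  let bandera := false
  if lista.contains elemento then true else bandera

-- inner 'for i in range(len(elecciones))' loop of A, over the remaining indices; 'break' = return bandera
def pvInnerA (elems : List String) (elecciones : List String) : List Int → Bool → Bool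
  | [], bandera => bandera
  | i :: rest, bandera =>
    if comprobar_elementos_en_lista elems (PySem.List.pyGetD elecciones i "") then
      (if i == 3 then true else pvInnerA elems elecciones rest bandera)
    else bandera

def comprobar_grupo (elecciones : List String) (lista_jugados : List (List (String × List String))) : Bool :=
  lista_jugados.foldl
    (fun bandera grupo =>
      pvInnerA (((PySem.Dict.mk grupo).get? "elementos").getD []) elecciones
        (PySem.List.pyRange 0 (elecciones.length : Int) 1) bandera)
    false

-- ===== PORT B =====
def comprobar_grupo_alt (elecciones : List String) (lista_jugados : List (List (String × List String))) : Bool :=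
  if elecciones.length < 4 then false
  else
    let idx : PySem.Dict String (PySem.Set Int) :=
      (PySem.List.enumerate lista_jugados 0).foldl
        (fun idx p =>
          (((PySem.Dict.mk p.2).get? "elementos").getD []).foldl
            (fun idx e => idx.modify e [] (fun s => PySem.Set.add s p.1)) idx)
        PySem.Dict.empty
    let common : PySem.Set Int :=
      (PySem.List.pyRange 1 4 1).foldl
        (fun c k => PySem.Set.inter c (idx.getD (PySem.List.pyGetD elecciones k "") []))
        (idx.getD (PySem.List.pyGetD elecciones 0 "") [])
    decide (0 < common.length)

-- ===== PRECONDITION & SPEC =====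
-- Pre_ excludes exactly the inputs where Python A raises KeyError: elecciones non-empty and some
-- group dict lacking the key "elementos".
def Pre_comprobar_grupo (elecciones : List String) (lista_jugados : List (List (String × List String))) : Prop :=
  elecciones = [] ∨ ∀ grupo ∈ lista_jugados, "elementos" ∈ grupo.map Prod.fst
instance (elecciones : List String) (lista_jugados : List (List (String × List String))) : Decidable (Pre_comprobar_grupo elecciones lista_jugados) := by unfold Pre_comprobar_grupo; infer_instance

def pvWitness_comprobar_grupo : List String × (List (List (String × List String))) :=
  (["a", "b", "c", "d"], [[("elementos", ["a", "b", "c", "d"])]])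

def Spec_comprobar_grupo (elecciones : List String) (lista_jugados : List (List (String × List String))) (out : Bool) : Prop := out = comprobar_grupo_alt elecciones lista_jugados
instance (elecciones : List String) (lista_jugados : List (List (String × List String))) (out : Bool) : Decidable (Spec_comprobar_grupo elecciones lista_jugados out) := by unfold Spec_comprobar_grupo; infer_instance

-- ===== CLAIM (what is proved, stated in full; the proofs are below) =====
def Claim_equal_comprobar_grupo : Prop := ∀ (elecciones : List String) (lista_jugados : List (List (String × List String))), Dom_comprobar_grupo elecciones lista_jugados → Pre_comprobar_grupo elecciones lista_jugados → Spec_comprobar_grupo elecciones lista_jugados (comprobar_grupo elecciones lista_jugados)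

-- ===== LEMMAS AND PROOFS =====

theorem pvInnerA_no3 (elems elecciones : List String) (l : List Int) (b : Bool)
    (h : ∀ i ∈ l, i ≠ 3) : pvInnerA elems elecciones l b = b := by
  induction l with
  | nil => rfl
  | cons i rest ih =>
    have hi : (i == 3) = false := by simpa using h i (by simp)
    simp only [pvInnerA, hi, Bool.false_eq_true, if_false]
    split
    · exact ih fun j hj => h j (by simp [hj])
    · rfl

theorem pvInnerA_ge4 (elems elecciones : List String) (b : Bool)
    (h : 4 ≤ elecciones.length) :
    pvInnerA elems elecciones (PySem.List.pyRange 0 (elecciones.length : Int) 1) b =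
      ((elems.contains (PySem.List.pyGetD elecciones 0 "") &&
        elems.contains (PySem.List.pyGetD elecciones 1 "") &&
        elems.contains (PySem.List.pyGetD elecciones 2 "") &&
        elems.contains (PySem.List.pyGetD elecciones 3 "")) || b) := by
  rw [PySem.List.pyRange_one_append 0 4 (elecciones.length : Int) (by omega) (by exact_mod_cast h)]
  have h4 : PySem.List.pyRange 0 4 1 = [0, 1, 2, 3] := by decide
  rw [h4]
  have hrest : pvInnerA elems elecciones (PySem.List.pyRange 4 (elecciones.length : Int) 1) b = b :=
    pvInnerA_no3 _ _ _ _ (by intro i hi; rw [PySem.List.mem_pyRange_one] at hi; omega)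
  simp only [List.cons_append, List.nil_append, pvInnerA, comprobar_elementos_en_lista, hrest]
  by_cases h0 : PySem.List.pyGetD elecciones 0 "" ∈ elems <;>
    by_cases h1 : PySem.List.pyGetD elecciones 1 "" ∈ elems <;>
      by_cases h2 : PySem.List.pyGetD elecciones 2 "" ∈ elems <;>
        by_cases h3 : PySem.List.pyGetD elecciones 3 "" ∈ elems <;>
          simp [h0, h1, h2, h3]

theorem pv_foldl_or {α : Type} (l : List α) (h : α → Bool) (b : Bool) :
    l.foldl (fun b g => h g || b) b = (b || l.any h) := by
  induction l generalizing b with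
  | nil => simp
  | cons x t ih =>
    rw [List.foldl_cons, ih, List.any_cons]
    cases b <;> cases h x <;> simp

-- membership in the index after the inner 'for e in grupo["elementos"]' loop
theorem pv_idx_inner_mem (elems : List String) (g : Int) (d : PySem.Dict String (PySem.Set Int))
    (x : String) (j : Int) :
    (j ∈ (elems.foldl (fun d e => d.modify e [] (fun s => PySem.Set.add s g)) d).getD x []) ↔
      (j ∈ d.getD x [] ∨ (x ∈ elems ∧ j = g)) := by
  induction elems generalizing d with
  | nil => simp
  | cons e t ih =>
    simp only [List.foldl_cons, ih, PySem.Dict.getD_modify]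
    by_cases hx : x = e
    · subst hx
      rw [if_pos rfl]
      simp only [PySem.Set.mem_add, List.mem_cons]
      tauto
    · rw [if_neg hx]
      simp only [List.mem_cons]
      tauto

-- membership in the index after the outer loop over enumerate(lista_jugados)
theorem pv_idx_mem (lj : List (List (String × List String))) (s : Int)
    (d : PySem.Dict String (PySem.Set Int)) (x : String) (j : Int) :
    (j ∈ ((PySem.List.enumerate lj s).foldl
        (fun idx p =>
          (((PySem.Dict.mk p.2).get? "elementos").getD []).foldl
            (fun idx e => idx.modify e [] (fun s => PySem.Set.add s p.1)) idx)
        d).getD x []) ↔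
      (j ∈ d.getD x [] ∨ ∃ k, ∃ _ : k < lj.length,
        j = s + (k : Int) ∧ x ∈ ((PySem.Dict.mk lj[k]).get? "elementos").getD []) := by
  induction lj generalizing s d with
  | nil => simp [PySem.List.enumerate]
  | cons grupo t ih =>
    rw [PySem.List.enumerate_cons]
    simp only [List.foldl_cons, ih, pv_idx_inner_mem]
    constructor
    · rintro ((hd | ⟨hx, hj⟩) | ⟨k, hk, hj, hx⟩)
      · exact Or.inl hd
      · exact Or.inr ⟨0, by simp, by simpa using hj, by simpa using hx⟩
      · exact Or.inr ⟨k + 1, by simpa using hk, by omega, by simpa using hx⟩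
    · rintro (hd | ⟨k, hk, hj, hx⟩)
      · exact Or.inl (Or.inl hd)
      · cases k with
        | zero => exact Or.inl (Or.inr ⟨by simpa using hx, by simpa using hj⟩)
        | succ k' =>
          refine Or.inr ⟨k', by simpa using hk, by omega, by simpa using hx⟩

-- ===== VERDICT (by name: the statement is the Claim_ definition above) =====
theorem comprobar_grupo_spec : Claim_equal_comprobar_grupo := by
  intro elecciones lista_jugados _ _
  unfold Spec_comprobar_grupo comprobar_grupo comprobar_grupo_alt
  by_cases hlen : elecciones.length < 4
  · rw [if_pos hlen]
    have hbody : ∀ (b : Bool) (grupo : List (String × List String)),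
        pvInnerA (((PySem.Dict.mk grupo).get? "elementos").getD []) elecciones
          (PySem.List.pyRange 0 (elecciones.length : Int) 1) b = b := by
      intro b grupo
      exact pvInnerA_no3 _ _ _ _ (by intro i hi; rw [PySem.List.mem_pyRange_one] at hi; omega)
    have : ∀ (b : Bool), lista_jugados.foldl
        (fun bandera grupo =>
          pvInnerA (((PySem.Dict.mk grupo).get? "elementos").getD []) elecciones
            (PySem.List.pyRange 0 (elecciones.length : Int) 1) bandera) b = b := by
      intro b
      induction lista_jugados generalizing b with
      | nil => rfl
      | cons g t ih => simp [List.foldl_cons, hbody]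
    simpa using this false
  · rw [if_neg hlen]
    have h4 : 4 ≤ elecciones.length := by omega
    have hA : lista_jugados.foldl
        (fun bandera grupo =>
          pvInnerA (((PySem.Dict.mk grupo).get? "elementos").getD []) elecciones
            (PySem.List.pyRange 0 (elecciones.length : Int) 1) bandera) false =
        lista_jugados.any (fun grupo =>
          (((PySem.Dict.mk grupo).get? "elementos").getD []).contains (PySem.List.pyGetD elecciones 0 "") &&
          (((PySem.Dict.mk grupo).get? "elementos").getD []).contains (PySem.List.pyGetD elecciones 1 "") &&
          (((PySem.Dict.mk grupo).get? "elementos").getD []).contains (PySem.List.pyGetD elecciones 2 "") &&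
          (((PySem.Dict.mk grupo).get? "elementos").getD []).contains (PySem.List.pyGetD elecciones 3 "")) := by
      have : (fun (bandera : Bool) (grupo : List (String × List String)) =>
          pvInnerA (((PySem.Dict.mk grupo).get? "elementos").getD []) elecciones
            (PySem.List.pyRange 0 (elecciones.length : Int) 1) bandera) =
          (fun bandera grupo =>
            ((((PySem.Dict.mk grupo).get? "elementos").getD []).contains (PySem.List.pyGetD elecciones 0 "") &&
             (((PySem.Dict.mk grupo).get? "elementos").getD []).contains (PySem.List.pyGetD elecciones 1 "") &&
             (((PySem.Dict.mk grupo).get? "elementos").getD []).contains (PySem.List.pyGetD elecciones 2 "") &&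
             (((PySem.Dict.mk grupo).get? "elementos").getD []).contains (PySem.List.pyGetD elecciones 3 "")) || bandera) := by
        funext b grupo; exact pvInnerA_ge4 _ _ _ h4
      rw [this, pv_foldl_or]
      simp
    rw [hA]
    have hrange : PySem.List.pyRange 1 4 1 = [1, 2, 3] := by decide
    rw [hrange]
    simp only [List.foldl_cons, List.foldl_nil]
    rw [Bool.eq_iff_iff]
    simp only [List.any_eq_true, Bool.and_eq_true, List.contains_eq_mem, decide_eq_true_eq,
      List.length_pos_iff_exists_mem, PySem.Set.mem_inter, pv_idx_mem, PySem.Dict.getD_empty,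
      List.not_mem_nil, false_or, and_assoc]
    constructor
    · rintro ⟨grupo, hg, h0, h1, h2, h3⟩
      obtain ⟨k, hk, rfl⟩ := List.mem_iff_getElem.mp hg
      exact ⟨(k : Int), ⟨k, hk, by omega, h0⟩, ⟨k, hk, by omega, h1⟩,
        ⟨k, hk, by omega, h2⟩, ⟨k, hk, by omega, h3⟩⟩
    · rintro ⟨j, ⟨k0, hk0, hj0, h0⟩, ⟨k1, hk1, hj1, h1⟩, ⟨k2, hk2, hj2, h2⟩, ⟨k3, hk3, hj3, h3⟩⟩
      have e1 : k1 = k0 := by omega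
      have e2 : k2 = k0 := by omega
      have e3 : k3 = k0 := by omega
      subst e1; subst e2; subst e3
      exact ⟨_, List.getElem_mem hk0, h0, h1, h2, h3⟩
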